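-- pv_equiv track=rewrite | github.com/JonathanSchaber/Masterarbeit | predict_SRL.py | merge_subtokens
-- ===== SOURCE A (Python) =====
-- def merge_subtokens(sentence):
--     merged_sent = []
--     for i, token in enumerate(sentence):
--         if token.startswith("##"):
--             continue
--         elif i+1 == len(sentence):
--             merged_sent.append(token)
--         elif not sentence[i+1].startswith("##"):
--             merged_sent.append(token)
--         else:
--             current_word = [token]
--             for subtoken in sentence[i+1:]:
--                 if subtoken.startswith("##"):
--                     current_word.append(subtoken.lstrip("##"))
--                 else:
--                     break
--             merged_sent.append("".join(current_word))
--     return merged_sent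
-- ===== SOURCE B (Python) =====
-- def merge_subtokens(sentence):
--     merged = []
--     parts = None  # pieces of the word currently being assembled
--     for token in sentence:
--         if token.startswith("##"):
--             if parts is not None:
--                 parts.append(token.lstrip("#"))
--         else:
--             if parts is not None:
--                 merged.append("".join(parts))
--             parts = [token]
--     if parts is not None:
--         merged.append("".join(parts))
--     return merged
-- ===== Notes on version B (the rewrite author's own statement) =====
-- stated objective: alternative
-- what changed: A looks ahead at sentence[i+1] and rescans the suffix sentence[i+1:] for each word start; B makes a single forward pass that accumulates the pieces of the current word and flushes it when the next word (or the end) is reached.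
import Mathlib
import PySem

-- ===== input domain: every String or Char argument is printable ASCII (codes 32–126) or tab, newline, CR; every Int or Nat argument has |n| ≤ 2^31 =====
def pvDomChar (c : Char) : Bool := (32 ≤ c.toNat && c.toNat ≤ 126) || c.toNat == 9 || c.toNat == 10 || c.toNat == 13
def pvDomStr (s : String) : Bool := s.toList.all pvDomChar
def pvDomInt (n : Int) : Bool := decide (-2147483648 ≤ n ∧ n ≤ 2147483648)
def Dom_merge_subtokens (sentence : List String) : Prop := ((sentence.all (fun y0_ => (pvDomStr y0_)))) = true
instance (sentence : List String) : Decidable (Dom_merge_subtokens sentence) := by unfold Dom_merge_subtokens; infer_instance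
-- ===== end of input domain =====

-- B replaces A's quadratic lookahead-plus-rescan with a single forward pass that
-- accumulates the pieces of the current word (one pass instead of lookahead + rescan).


-- ===== PORT A =====

-- s.lstrip("##"): strips every leading character of the set {'#'}; exact.
def lstripHash (s : String) : String := String.ofList (s.toList.dropWhile (· == '#'))

-- A's inner loop: 'for subtoken in sentence[i+1:]: if ##: append stripped else break'
def innerA : List String → List String
  | [] => []
  | s :: rest =>
    if PySem.Str.startswith s "##" then lstripHash s :: innerA rest else []

-- the body of A's outer for-loop (merged = accumulator, it = (i, token))
def stepA (sentence : List String) (merged : List String) (it : Int × String) : List String :=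
  if PySem.Str.startswith it.2 "##" then merged
  else if it.1 + 1 = (sentence.length : Int) then merged ++ [it.2]
  -- previous branch guarantees i+1 is in range, so the .getD "" default is never used
  else if ¬ PySem.Str.startswith ((PySem.List.pyGet? sentence (it.1 + 1)).getD "") "##" then
    merged ++ [it.2]
  else
    merged ++ [PySem.Str.join "" (it.2 :: innerA (PySem.List.slice sentence (some (it.1 + 1)) none))]

def merge_subtokens (sentence : List String) : List String :=
  (PySem.List.enumerate sentence 0).foldl (stepA sentence) []

-- ===== PORT B =====

-- B's forward loop: merged = output so far, parts = pieces of the current word (None before the first word)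
def bgo (merged : List String) (parts : Option (List String)) : List String → List String
  | [] =>
    match parts with
    | some ps => merged ++ [PySem.Str.join "" ps]
    | none => merged
  | t :: rest =>
    if PySem.Str.startswith t "##" then
      match parts with
      | some ps => bgo merged (some (ps ++ [lstripHash t])) rest
      | none => bgo merged none rest
    else
      match parts with
      | some ps => bgo (merged ++ [PySem.Str.join "" ps]) (some [t]) rest
      | none => bgo merged (some [t]) rest

def merge_subtokens_alt (sentence : List String) : List String :=
  bgo [] none sentence

-- ===== PRECONDITION & SPEC =====
def Spec_merge_subtokens (sentence : List String) (out : List String) : Prop := out = merge_subtokens_alt sentence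
instance (sentence : List String) (out : List String) : Decidable (Spec_merge_subtokens sentence out) := by unfold Spec_merge_subtokens; infer_instance

-- ===== CLAIM (what is proved, stated in full; the proofs are below) =====
def Claim_equal_merge_subtokens : Prop := ∀ (sentence : List String), Dom_merge_subtokens sentence → Spec_merge_subtokens sentence (merge_subtokens sentence)

-- ===== LEMMAS AND PROOFS =====

-- a local (index-free) description of A's outer loop, the common meeting point of the two proofs
def mergeL : List String → List String
  | [] => []
  | t :: rest =>
    if PySem.Str.startswith t "##" then mergeL rest
    else
      match rest with
      | [] => [t]
      | u :: _ =>
        if PySem.Str.startswith u "##" then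
          PySem.Str.join "" (t :: innerA rest) :: mergeL rest
        else t :: mergeL rest


lemma join_nil_singleton (t : String) : PySem.Str.join "" [t] = t := by
  apply String.toList_inj.mp
  simp [PySem.Str.toList_join, PySem.Chars.join_singleton]

lemma mergeL_dropWhile (l : List String) :
    mergeL (l.dropWhile (fun s => PySem.Chars.startswith s.toList ['#', '#'])) = mergeL l := by
  induction l with
  | nil => rfl
  | cons t rest ih =>
    by_cases h : PySem.Chars.startswith t.toList ['#', '#'] = true
    · simpa [h, mergeL] using ih
    · simp [h]

lemma foldA (suf : List String) : ∀ (pre acc : List String),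
    (PySem.List.enumerate suf (pre.length : Int)).foldl (stepA (pre ++ suf)) acc
      = acc ++ mergeL suf := by
  induction suf with
  | nil => intro pre acc; simp [PySem.List.enumerate_nil, mergeL]
  | cons t rest ih =>
    intro pre acc
    rw [PySem.List.enumerate_cons, List.foldl_cons]
    have hre : pre ++ t :: rest = (pre ++ [t]) ++ rest := by simp
    have hlen : ((pre ++ [t]).length : Int) = (pre.length : Int) + 1 := by
      push_cast [List.length_append]; simp
    by_cases hsw : PySem.Chars.startswith t.toList ['#', '#'] = true
    · have hstep : stepA (pre ++ t :: rest) acc ((pre.length : Int), t) = acc := by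
        simp [stepA, hsw]
      rw [hstep, hre, ← hlen, ih (pre ++ [t]) acc]
      simp [mergeL, hsw]
    · cases rest with
      | nil =>
        have hstep : stepA (pre ++ [t]) acc ((pre.length : Int), t) = acc ++ [t] := by
          simp [stepA, hsw]
        rw [hstep, PySem.List.enumerate_nil, List.foldl_nil]
        simp [mergeL, hsw]
      | cons u rs =>
        have hne : (pre.length : Int) + 1 ≠ ((pre ++ t :: u :: rs).length : Int) := by
          simp; omega
        have hget : PySem.List.pyGet? (pre ++ t :: u :: rs) ((pre.length : Int) + 1) = some u := by
          have h1 : ((pre.length : Int) + 1) = (((pre.length + 1 : Nat) : Int)) := by push_cast; ring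
          rw [h1, PySem.List.pyGet?_natCast, hre]
          rw [List.getElem?_append_right (by simp)]
          simp
        have hslice : PySem.List.slice (pre ++ t :: u :: rs) (some ((pre.length : Int) + 1)) none = u :: rs := by
          have h1 : ((pre.length : Int) + 1) = (((pre.length + 1 : Nat) : Int)) := by push_cast; ring
          rw [h1, PySem.List.slice_from_natCast, hre]
          rw [List.drop_append_of_le_length (by simp)]
          simp
        by_cases hswu : PySem.Chars.startswith u.toList ['#', '#'] = true
        · have hstep : stepA (pre ++ t :: u :: rs) acc ((pre.length : Int), t)
              = acc ++ [PySem.Str.join "" (t :: innerA (u :: rs))] := by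
            rw [stepA]
            rw [if_neg (by simp [hsw]), if_neg hne, hget, hslice]
            simp [hswu]
          rw [hstep, hre, ← hlen, ih (pre ++ [t])]
          simp [mergeL, hsw, hswu]
        · have hstep : stepA (pre ++ t :: u :: rs) acc ((pre.length : Int), t) = acc ++ [t] := by
            rw [stepA]
            rw [if_neg (by simp [hsw]), if_neg hne, hget]
            simp [hswu]
          rw [hstep, hre, ← hlen, ih (pre ++ [t])]
          simp [mergeL, hsw, hswu]

lemma A_eq_mergeL (sentence : List String) : merge_subtokens sentence = mergeL sentence := by
  have := foldA sentence [] []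
  simpa [merge_subtokens] using this

lemma mergeL_cons_word (t : String) (rest : List String)
    (h : ¬ PySem.Chars.startswith t.toList ['#', '#'] = true) :
    mergeL (t :: rest)
      = PySem.Str.join "" (t :: innerA rest)
          :: mergeL (rest.dropWhile (fun s => PySem.Chars.startswith s.toList ['#', '#'])) := by
  cases rest with
  | nil => simp [mergeL, innerA, h, join_nil_singleton]
  | cons u rs =>
    by_cases hswu : PySem.Chars.startswith u.toList ['#', '#'] = true
    · simp [mergeL, h, hswu]
      simp [mergeL_dropWhile rs]
    · simp [mergeL, h, hswu, innerA, join_nil_singleton]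

lemma bgo_some (l : List String) : ∀ (merged ps : List String),
    bgo merged (some ps) l
      = merged ++ [PySem.Str.join "" (ps ++ innerA l)]
          ++ mergeL (l.dropWhile (fun s => PySem.Chars.startswith s.toList ['#', '#'])) := by
  induction l with
  | nil => intro merged ps; simp [bgo, innerA, mergeL]
  | cons t rest ih =>
    intro merged ps
    by_cases hsw : PySem.Chars.startswith t.toList ['#', '#'] = true
    · rw [show bgo merged (some ps) (t :: rest)
            = bgo merged (some (ps ++ [lstripHash t])) rest by simp [bgo, hsw]]
      rw [ih]
      simp [innerA, hsw]
    · rw [show bgo merged (some ps) (t :: rest)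
            = bgo (merged ++ [PySem.Str.join "" ps]) (some [t]) rest by simp [bgo, hsw]]
      rw [ih]
      simp [innerA, hsw, mergeL_cons_word t rest hsw]

lemma bgo_none (l : List String) : ∀ (merged : List String),
    bgo merged none l = merged ++ mergeL l := by
  induction l with
  | nil => intro merged; simp [bgo, mergeL]
  | cons t rest ih =>
    intro merged
    by_cases hsw : PySem.Chars.startswith t.toList ['#', '#'] = true
    · rw [show bgo merged none (t :: rest) = bgo merged none rest by simp [bgo, hsw]]
      rw [ih]; simp [mergeL, hsw]
    · rw [show bgo merged none (t :: rest) = bgo merged (some [t]) rest by simp [bgo, hsw]]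
      rw [bgo_some]
      simp [mergeL_cons_word t rest hsw]

-- ===== VERDICT (by name: the statement is the Claim_ definition above) =====
theorem merge_subtokens_spec : Claim_equal_merge_subtokens := by
  intro sentence _
  show merge_subtokens sentence = merge_subtokens_alt sentence
  rw [A_eq_mergeL, merge_subtokens_alt, bgo_none]
  simp
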